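-- pv_equiv track=rewrite | github.com/nicklasanielsen/python-eksamen | application/utils/data_fetcher.py | district_sorter
-- ===== SOURCE A (Python) =====
-- def district_sorter(links=[]):
--     districts = {
--         "bornholm": [],
--         "fyn": [],
--         "koebenhavns_vestegn": [],
--         "midt_og_vestsjaelland": [],
--         "nordjylland": [],
--         "nordsjaelland": [],
--         "oestjylland": [],
--         "sydsjaellands_og_lolland_falster": [],
--     }
--
--     for link in links:
--         if "bornholms-politi" in link:
--             districts["bornholm"].append(link)
--         elif "fyns-politi" in link:
--             districts["fyn"].append(link)
--         elif "koebenhavns-vestegns-politi" in link: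
--             districts["koebenhavns_vestegn"].append(link)
--         elif "midt-og-vestsjaellands-politi" in link:
--             districts["midt_og_vestsjaelland"].append(link)
--         elif "nordjyllands-politi" in link:
--             districts["nordjylland"].append(link)
--         elif "nordsjaellands-politi" in link:
--             districts["nordsjaelland"].append(link)
--         elif "sydsjaellands-og-lolland-falsters-politi" in link:
--             districts["sydsjaellands_og_lolland_falster"].append(link)
--         elif "oestjyllands-politi" in link:
--             districts["oestjylland"].append(link)
--
--     return districts
-- ===== SOURCE B (Python) =====
-- TABLE = [
--     ("bornholms-politi", "bornholm"),
--     ("fyns-politi", "fyn"),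
--     ("koebenhavns-vestegns-politi", "koebenhavns_vestegn"),
--     ("midt-og-vestsjaellands-politi", "midt_og_vestsjaelland"),
--     ("nordjyllands-politi", "nordjylland"),
--     ("nordsjaellands-politi", "nordsjaelland"),
--     ("sydsjaellands-og-lolland-falsters-politi", "sydsjaellands_og_lolland_falster"),
--     ("oestjyllands-politi", "oestjylland"),
-- ]
--
-- KEYS = [
--     "bornholm",
--     "fyn",
--     "koebenhavns_vestegn",
--     "midt_og_vestsjaelland",
--     "nordjylland",
--     "nordsjaelland",
--     "oestjylland",
--     "sydsjaellands_og_lolland_falster",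
-- ]
--
--
-- def _classify(link):
--     return next((key for pat, key in TABLE if pat in link), None)
--
--
-- def district_sorter(links=[]):
--     return {key: [link for link in links if _classify(link) == key] for key in KEYS}
-- ===== Notes on version B (the rewrite author's own statement) =====
-- stated objective: idiomatic
-- what changed: Replaced the eight-branch elif chain that mutates a pre-built dict with a data-driven (substring, key) table, a classifier function, and a dict comprehension that builds each bucket by filtering the links per key.
import Mathlib
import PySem

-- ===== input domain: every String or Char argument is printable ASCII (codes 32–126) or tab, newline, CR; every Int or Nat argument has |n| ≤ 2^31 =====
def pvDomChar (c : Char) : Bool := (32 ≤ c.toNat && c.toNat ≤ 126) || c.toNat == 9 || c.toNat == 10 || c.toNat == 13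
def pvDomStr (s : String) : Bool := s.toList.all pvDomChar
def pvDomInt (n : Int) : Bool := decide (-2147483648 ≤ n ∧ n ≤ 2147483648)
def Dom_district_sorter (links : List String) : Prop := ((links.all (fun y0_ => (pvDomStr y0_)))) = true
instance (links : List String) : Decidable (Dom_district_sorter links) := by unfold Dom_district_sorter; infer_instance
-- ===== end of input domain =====

-- B replaces A's eight-branch elif chain with a (substring, key) table, a first-match classifier,
-- and a per-key filter dict comprehension (idiomatic data-driven rewrite; same cost class).


-- ===== PORT A =====
-- literal port of A's loop body: the if/elif chain mutating the dict
def districtStepA (d : PySem.Dict String (List String)) (link : String) :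
    PySem.Dict String (List String) :=
  if PySem.Str.isIn "bornholms-politi" link then d.modify "bornholm" [] (· ++ [link])
  else if PySem.Str.isIn "fyns-politi" link then d.modify "fyn" [] (· ++ [link])
  else if PySem.Str.isIn "koebenhavns-vestegns-politi" link then d.modify "koebenhavns_vestegn" [] (· ++ [link])
  else if PySem.Str.isIn "midt-og-vestsjaellands-politi" link then d.modify "midt_og_vestsjaelland" [] (· ++ [link])
  else if PySem.Str.isIn "nordjyllands-politi" link then d.modify "nordjylland" [] (· ++ [link])
  else if PySem.Str.isIn "nordsjaellands-politi" link then d.modify "nordsjaelland" [] (· ++ [link])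
  else if PySem.Str.isIn "sydsjaellands-og-lolland-falsters-politi" link then d.modify "sydsjaellands_og_lolland_falster" [] (· ++ [link])
  else if PySem.Str.isIn "oestjyllands-politi" link then d.modify "oestjylland" [] (· ++ [link])
  else d

def district_sorter (links : List String) : List (String × List String) :=
  (links.foldl districtStepA (PySem.Dict.ofList [("bornholm", []), ("fyn", []), ("koebenhavns_vestegn", []), ("midt_og_vestsjaelland", []), ("nordjylland", []), ("nordsjaelland", []), ("oestjylland", []), ("sydsjaellands_og_lolland_falster", [])])).items

-- ===== PORT B =====
def pvTable : List (String × String) :=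
  [("bornholms-politi", "bornholm"), ("fyns-politi", "fyn"), ("koebenhavns-vestegns-politi", "koebenhavns_vestegn"), ("midt-og-vestsjaellands-politi", "midt_og_vestsjaelland"), ("nordjyllands-politi", "nordjylland"), ("nordsjaellands-politi", "nordsjaelland"), ("sydsjaellands-og-lolland-falsters-politi", "sydsjaellands_og_lolland_falster"), ("oestjyllands-politi", "oestjylland")]

def pvKeys : List String :=
  ["bornholm", "fyn", "koebenhavns_vestegn", "midt_og_vestsjaelland", "nordjylland", "nordsjaelland", "oestjylland", "sydsjaellands_og_lolland_falster"]

-- next((key for pat, key in TABLE if pat in link), None)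
def districtClassify (link : String) : Option String :=
  (pvTable.find? (fun p => PySem.Str.isIn p.1 link)).map (·.2)

-- the dict comprehension; its keys are the distinct literals of pvKeys in order, so its items are this map
def district_sorter_alt (links : List String) : List (String × List String) :=
  pvKeys.map (fun key => (key, links.filter (fun link => districtClassify link == some key)))

-- ===== PRECONDITION & SPEC =====
def Spec_district_sorter (links : List String) (out : List (String × List String)) : Prop := out = district_sorter_alt links
instance (links : List String) (out : List (String × List String)) : Decidable (Spec_district_sorter links out) := by unfold Spec_district_sorter; infer_instance

-- ===== CLAIM (what is proved, stated in full; the proofs are below) =====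
def Claim_equal_district_sorter : Prop := ∀ (links : List String), Dom_district_sorter links → Spec_district_sorter links (district_sorter links)

-- ===== LEMMAS AND PROOFS =====

-- the links of `links` that B's classifier sends to key `k`, in order
def pvBucket (links : List String) (k : String) : List String :=
  links.filter (fun link => districtClassify link == some k)

-- loop invariant: folding A's step over `links` from any dict with exactly the eight literal
-- keys appends to each value the bucket of links B's classifier assigns to that key
theorem district_sorter_loop_invariant (links : List String)
    (b f kv m nj ns o s : List String) :
    (links.foldl districtStepA (PySem.Dict.mk [("bornholm", b), ("fyn", f), ("koebenhavns_vestegn", kv), ("midt_og_vestsjaelland", m), ("nordjylland", nj), ("nordsjaelland", ns), ("oestjylland", o), ("sydsjaellands_og_lolland_falster", s)])).items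
    = [("bornholm", b ++ pvBucket links "bornholm"),
       ("fyn", f ++ pvBucket links "fyn"),
       ("koebenhavns_vestegn", kv ++ pvBucket links "koebenhavns_vestegn"),
       ("midt_og_vestsjaelland", m ++ pvBucket links "midt_og_vestsjaelland"),
       ("nordjylland", nj ++ pvBucket links "nordjylland"),
       ("nordsjaelland", ns ++ pvBucket links "nordsjaelland"),
       ("oestjylland", o ++ pvBucket links "oestjylland"),
       ("sydsjaellands_og_lolland_falster", s ++ pvBucket links "sydsjaellands_og_lolland_falster")] := by
  induction links generalizing b f kv m nj ns o s with
  | nil => simp [pvBucket]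
  | cons link rest ih =>
    simp only [List.foldl_cons, districtStepA]
    by_cases h1 : PySem.Str.isIn "bornholms-politi" link = true
    · simp at h1
      simp [h1, PySem.Dict.modify, PySem.Dict.getD, PySem.Dict.get?,
        PySem.Dict.insert, PySem.Dict.contains]
      rw [ih]
      simp [pvBucket, districtClassify, pvTable, h1]
    by_cases h2 : PySem.Str.isIn "fyns-politi" link = true
    · simp at h1 h2
      simp [h1, h2, PySem.Dict.modify, PySem.Dict.getD, PySem.Dict.get?,
        PySem.Dict.insert, PySem.Dict.contains]
      rw [ih]
      simp [pvBucket, districtClassify, pvTable, h1, h2]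
    by_cases h3 : PySem.Str.isIn "koebenhavns-vestegns-politi" link = true
    · simp at h1 h2 h3
      simp [h1, h2, h3, PySem.Dict.modify, PySem.Dict.getD, PySem.Dict.get?,
        PySem.Dict.insert, PySem.Dict.contains]
      rw [ih]
      simp [pvBucket, districtClassify, pvTable, h1, h2, h3]
    by_cases h4 : PySem.Str.isIn "midt-og-vestsjaellands-politi" link = true
    · simp at h1 h2 h3 h4
      simp [h1, h2, h3, h4, PySem.Dict.modify, PySem.Dict.getD, PySem.Dict.get?,
        PySem.Dict.insert, PySem.Dict.contains]
      rw [ih]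
      simp [pvBucket, districtClassify, pvTable, h1, h2, h3, h4]
    by_cases h5 : PySem.Str.isIn "nordjyllands-politi" link = true
    · simp at h1 h2 h3 h4 h5
      simp [h1, h2, h3, h4, h5, PySem.Dict.modify, PySem.Dict.getD, PySem.Dict.get?,
        PySem.Dict.insert, PySem.Dict.contains]
      rw [ih]
      simp [pvBucket, districtClassify, pvTable, h1, h2, h3, h4, h5]
    by_cases h6 : PySem.Str.isIn "nordsjaellands-politi" link = true
    · simp at h1 h2 h3 h4 h5 h6
      simp [h1, h2, h3, h4, h5, h6, PySem.Dict.modify, PySem.Dict.getD, PySem.Dict.get?,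
        PySem.Dict.insert, PySem.Dict.contains]
      rw [ih]
      simp [pvBucket, districtClassify, pvTable, h1, h2, h3, h4, h5, h6]
    by_cases h7 : PySem.Str.isIn "sydsjaellands-og-lolland-falsters-politi" link = true
    · simp at h1 h2 h3 h4 h5 h6 h7
      simp [h1, h2, h3, h4, h5, h6, h7, PySem.Dict.modify, PySem.Dict.getD, PySem.Dict.get?,
        PySem.Dict.insert, PySem.Dict.contains]
      rw [ih]
      simp [pvBucket, districtClassify, pvTable, h1, h2, h3, h4, h5, h6, h7]
    by_cases h8 : PySem.Str.isIn "oestjyllands-politi" link = true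
    · simp at h1 h2 h3 h4 h5 h6 h7 h8
      simp [h1, h2, h3, h4, h5, h6, h7, h8, PySem.Dict.modify, PySem.Dict.getD, PySem.Dict.get?,
        PySem.Dict.insert, PySem.Dict.contains]
      rw [ih]
      simp [pvBucket, districtClassify, pvTable, h1, h2, h3, h4, h5, h6, h7, h8]
    simp at h1 h2 h3 h4 h5 h6 h7 h8
    simp [h1, h2, h3, h4, h5, h6, h7, h8]
    rw [ih]
    simp [pvBucket, districtClassify, pvTable, h1, h2, h3, h4, h5, h6, h7, h8]

-- ===== VERDICT (by name: the statement is the Claim_ definition above) =====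
theorem district_sorter_spec : Claim_equal_district_sorter := by
  intro links _
  unfold Spec_district_sorter district_sorter district_sorter_alt
  rw [show PySem.Dict.ofList [("bornholm", []), ("fyn", []), ("koebenhavns_vestegn", []), ("midt_og_vestsjaelland", []), ("nordjylland", []), ("nordsjaelland", []), ("oestjylland", []), ("sydsjaellands_og_lolland_falster", [])]
      = (PySem.Dict.mk [("bornholm", []), ("fyn", []), ("koebenhavns_vestegn", []), ("midt_og_vestsjaelland", []), ("nordjylland", []), ("nordsjaelland", []), ("oestjylland", []), ("sydsjaellands_og_lolland_falster", [])]) from by decide]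
  rw [district_sorter_loop_invariant]
  simp [pvKeys, pvBucket]
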